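-- pv_equiv track=rewrite | github.com/dbridera/named | src/named/suggestions/common.py | is_hallucinated
-- ===== SOURCE A (Python) =====
-- METHOD_PREFIXES = (
--     "get", "set", "is", "has", "find", "fetch", "load",
--     "save", "update", "delete", "create", "build",
-- )
--
-- def is_hallucinated(suggested_name: str, symbol_kind: str) -> bool:
--     """Return True if the suggestion looks like a method name for a non-method symbol.
--
--     Detects the common hallucination where the LLM suggests a getter/setter-style
--     name for a field or parameter (e.g., 'getBalance' suggested for a parameter).
--     """
--     if symbol_kind not in ("field", "parameter", "constant"):
--         return False
--     for prefix in METHOD_PREFIXES: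
--         if (
--             suggested_name.startswith(prefix)
--             and len(suggested_name) > len(prefix)
--             and suggested_name[len(prefix)].isupper()
--         ):
--             return True
--     return False
-- ===== SOURCE B (Python) =====
-- METHOD_PREFIXES = (
--     "get", "set", "is", "has", "find", "fetch", "load",
--     "save", "update", "delete", "create", "build",
-- )
--
-- _PREFIX_SET = frozenset(METHOD_PREFIXES)
--
--
-- def is_hallucinated(suggested_name: str, symbol_kind: str) -> bool:
--     """Scan for the first uppercase character; one set lookup on the run before it."""
--     if symbol_kind not in ("field", "parameter", "constant"):
--         return False
--     for i, c in enumerate(suggested_name):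
--         if c.isupper():
--             return suggested_name[:i] in _PREFIX_SET
--     return False
-- ===== Notes on version B (the rewrite author's own statement) =====
-- stated objective: idiomatic
-- what changed: Instead of testing every candidate prefix with startswith/length/isupper checks, B scans once for the first uppercase character and does a single set lookup of the run before it.
import Mathlib
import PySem

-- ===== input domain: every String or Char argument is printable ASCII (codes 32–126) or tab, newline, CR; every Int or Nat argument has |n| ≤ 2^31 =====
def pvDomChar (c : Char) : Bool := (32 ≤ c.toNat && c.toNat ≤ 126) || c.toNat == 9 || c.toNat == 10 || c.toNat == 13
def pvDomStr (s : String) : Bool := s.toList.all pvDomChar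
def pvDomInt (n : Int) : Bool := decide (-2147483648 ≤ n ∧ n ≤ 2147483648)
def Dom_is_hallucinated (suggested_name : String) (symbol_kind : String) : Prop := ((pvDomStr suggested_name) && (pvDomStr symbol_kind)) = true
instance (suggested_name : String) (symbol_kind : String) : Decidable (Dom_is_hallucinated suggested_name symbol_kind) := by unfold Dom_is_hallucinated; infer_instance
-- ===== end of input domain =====

-- B replaces A's per-prefix startswith tests by one scan for the first uppercase
-- character followed by a single set lookup (idiomatic; same behaviour).

-- ===== PORT A =====
def pvMethodPrefixes : List String :=
  ["get", "set", "is", "has", "find", "fetch", "load",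
   "save", "update", "delete", "create", "build"]

-- the body of A's 'if' for one prefix
def pvCheck (s : List Char) (p : String) : Bool :=
  PySem.Chars.startswith s p.toList
    && decide (s.length > p.toList.length)
    && (match PySem.List.pyGet? s (p.toList.length : Int) with
        | some c => PySem.Chars.isupper c
        | none => false)

-- the 'for prefix in METHOD_PREFIXES' loop of A
def pvLoopA (s : List Char) : List String → Bool
  | [] => false
  | p :: ps => if pvCheck s p then true else pvLoopA s ps

def is_hallucinated (suggested_name : String) (symbol_kind : String) : Bool :=
  if !(["field", "parameter", "constant"].contains symbol_kind) then false
  else pvLoopA suggested_name.toList pvMethodPrefixes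

-- ===== PORT B =====
def pvPrefixSet : List (List Char) := pvMethodPrefixes.map String.toList

-- the 'for i, c in enumerate(suggested_name)' loop of B: i is the index, rest the remaining chars
def pvScanB (s : List Char) (rest : List Char) (i : Nat) : Bool :=
  match rest with
  | [] => false
  | c :: cs =>
    if PySem.Chars.isupper c then pvPrefixSet.contains (s.take i)
    else pvScanB s cs (i + 1)

def is_hallucinated_alt (suggested_name : String) (symbol_kind : String) : Bool :=
  if !(["field", "parameter", "constant"].contains symbol_kind) then false
  else pvScanB suggested_name.toList suggested_name.toList 0

-- ===== PRECONDITION & SPEC =====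
def Spec_is_hallucinated (suggested_name : String) (symbol_kind : String) (out : Bool) : Prop := out = is_hallucinated_alt suggested_name symbol_kind
instance (suggested_name : String) (symbol_kind : String) (out : Bool) : Decidable (Spec_is_hallucinated suggested_name symbol_kind out) := by unfold Spec_is_hallucinated; infer_instance

-- ===== CLAIM (what is proved, stated in full; the proofs are below) =====
def Claim_equal_is_hallucinated : Prop := ∀ (suggested_name : String) (symbol_kind : String), Dom_is_hallucinated suggested_name symbol_kind → Spec_is_hallucinated suggested_name symbol_kind (is_hallucinated suggested_name symbol_kind)

-- ===== LEMMAS AND PROOFS =====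

theorem pvLoopA_eq_any (s : List Char) (ps : List String) :
    pvLoopA s ps = ps.any (pvCheck s) := by
  induction ps with
  | nil => rfl
  | cons p ps ih =>
    rw [List.any_cons, ← ih, pvLoopA]
    cases hc : pvCheck s p <;> simp

theorem pvScanB_eq_findIdx? (s : List Char) (rest : List Char) (i : Nat) :
    pvScanB s rest i =
      (match rest.findIdx? PySem.Chars.isupper with
       | some k => pvPrefixSet.contains (s.take (i + k))
       | none => false) := by
  induction rest generalizing i with
  | nil => rfl
  | cons c cs ih =>
    simp only [pvScanB, List.findIdx?_cons]
    by_cases hc : PySem.Chars.isupper c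
    · simp [hc]
    · simp only [hc, if_false, Bool.false_eq_true, ih]
      cases h : cs.findIdx? PySem.Chars.isupper with
      | none => simp
      | some k =>
        simp only [Option.map_some]
        have : i + 1 + k = i + (k + 1) := by omega
        rw [this]

theorem pvPrefixes_lower :
    ∀ p ∈ pvMethodPrefixes, ∀ c ∈ p.toList, PySem.Chars.isupper c = false := by
  have h : pvMethodPrefixes.all
      (fun p => p.toList.all (fun c => !PySem.Chars.isupper c)) = true := by decide
  simp only [List.all_eq_true, Bool.not_eq_eq_eq_not, Bool.not_true] at h
  exact h

theorem pvCheck_false_of_no_upper (s : List Char)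
    (hf : ∀ x ∈ s, PySem.Chars.isupper x = false) (p : String) :
    pvCheck s p = false := by
  unfold pvCheck
  cases hg : PySem.List.pyGet? s (p.toList.length : Int) with
  | none => simp
  | some c =>
    have hmem : c ∈ s := PySem.List.mem_of_pyGet?_eq_some s hg
    simp [hf c hmem]

theorem pvLoop_eq_scan (s : List Char) :
    pvLoopA s pvMethodPrefixes = pvScanB s s 0 := by
  rw [pvLoopA_eq_any, pvScanB_eq_findIdx?]
  cases hf : s.findIdx? PySem.Chars.isupper with
  | none =>
    -- no uppercase char at all: every prefix test fails on the isupper conjunct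
    rw [List.findIdx?_eq_none_iff] at hf
    simp only [List.any_eq_false]
    intro p _hp
    simp [pvCheck_false_of_no_upper s hf p]
  | some k =>
    obtain ⟨hk, hup, hbefore⟩ := List.findIdx?_eq_some_iff_getElem.mp hf
    simp only [Nat.zero_add]
    by_cases hin : pvPrefixSet.contains (s.take k) = true
    · -- the run before the first uppercase char is a known prefix: A also succeeds
      rw [hin, List.any_eq_true]
      obtain ⟨p, hp, hpl⟩ : ∃ p ∈ pvMethodPrefixes, p.toList = s.take k := by
        have := List.contains_iff_mem.mp hin
        simp only [pvPrefixSet, List.mem_map] at this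
        obtain ⟨p, hpm, hpe⟩ := this
        exact ⟨p, hpm, hpe⟩
      refine ⟨p, hp, ?_⟩
      have hlen : p.toList.length = k := by
        rw [hpl, List.length_take]; omega
      have hpre : PySem.Chars.startswith s p.toList = true := by
        rw [PySem.Chars.startswith_iff, hpl]; exact List.take_prefix k s
      have hget : PySem.List.pyGet? s ((p.toList.length : Nat) : Int) = some s[k] := by
        rw [hlen]; exact PySem.List.pyGet?_ofNat s k hk
      unfold pvCheck
      rw [hget]
      simp [hpre, hlen, hk, hup]
    · -- otherwise no prefix test can succeed
      rw [Bool.not_eq_true] at hin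
      rw [hin, List.any_eq_false]
      intro p hp
      by_contra hcp

      unfold pvCheck at hcp
      cases hg : PySem.List.pyGet? s (p.toList.length : Int) with
      | none => rw [hg] at hcp; simp at hcp
      | some c =>
        rw [hg] at hcp
        simp only [Bool.and_eq_true, decide_eq_true_eq] at hcp
        obtain ⟨⟨hsw, hplen⟩, hupc⟩ := hcp
        have hg' : PySem.List.pyGet? s (p.toList.length : Int) = some s[p.toList.length] :=
          PySem.List.pyGet?_ofNat s p.toList.length hplen
        rw [hg'] at hg
        have hc : c = s[p.toList.length] := by injection hg.symm
        subst hc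
        rw [PySem.Chars.startswith_iff] at hsw
        obtain ⟨t, ht⟩ := hsw
        subst ht
        -- k ≤ p.length: s[p.length] is uppercase and k is minimal such index
        have hk_le : k ≤ p.toList.length := by
          by_contra hlt
          exact (hbefore p.toList.length (by omega)) hupc
        -- p.length ≤ k: the chars of s below p.length are p's chars, all lowercase
        have hk_ge : p.toList.length ≤ k := by
          by_contra hlt
          push Not at hlt
          rw [List.getElem_append_left (by omega)] at hup
          exact Bool.false_ne_true
            ((pvPrefixes_lower p hp _ (List.getElem_mem _)) ▸ hup)
        have hkeq : k = p.toList.length := le_antisymm hk_le hk_ge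
        have htake : (p.toList ++ t).take k = p.toList := by
          rw [hkeq]; exact List.take_left
        have : pvPrefixSet.contains ((p.toList ++ t).take k) = true := by
          rw [List.contains_iff_mem, htake]
          simp only [pvPrefixSet, List.mem_map]
          exact ⟨p, hp, rfl⟩
        rw [hin] at this
        exact Bool.false_ne_true this

-- ===== VERDICT (by name: the statement is the Claim_ definition above) =====
theorem is_hallucinated_spec : Claim_equal_is_hallucinated := by
  intro sn sk _
  unfold Spec_is_hallucinated is_hallucinated is_hallucinated_alt
  split_ifs with h
  · rfl
  · exact pvLoop_eq_scan sn.toList
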